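-- pv_equiv track=rewrite | github.com/Devendrasharma01/TCS_Questions | Task_11.py | calculate_earnings
-- ===== SOURCE A (Python) =====
-- def calculate_earnings(patient_ages):
--
--   total_income = 0
--   max_patients = 20
--
--   if len(patient_ages) > max_patients:
--     return "INVALID INPUT: Maximum 20 patients allowed."
--
--   for age in patient_ages:
--     if age <= 0 or age > 120:
--       return "INVALID INPUT: Age must be between 1 and 120."
--     elif age < 17:
--       total_income += 200
--     elif age <= 40:
--       total_income += 400
--     else:
--       total_income += 300
--
--   return f"Total Income: {total_income} INR"
-- ===== SOURCE B (Python) =====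
-- def calculate_earnings(patient_ages):
--     if len(patient_ages) > 20:
--         return "INVALID INPUT: Maximum 20 patients allowed."
--     if patient_ages and (min(patient_ages) <= 0 or max(patient_ages) > 120):
--         return "INVALID INPUT: Age must be between 1 and 120."
--     counts = {}
--     for age in patient_ages:
--         counts[age] = counts.get(age, 0) + 1
--     total_income = 0
--     for age, k in counts.items():
--         total_income += (200 if age < 17 else 400 if age <= 40 else 300) * k
--     return f"Total Income: {total_income} INR"
-- ===== Notes on version B (the rewrite author's own statement) =====
-- stated objective: alternative
-- what changed: A's single interleaved early-exit loop is replaced by range validation via min/max extremes and a total aggregated over an age histogram (dict built once; the tier fee is computed once per distinct age and multiplied by its multiplicity).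
import Mathlib
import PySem

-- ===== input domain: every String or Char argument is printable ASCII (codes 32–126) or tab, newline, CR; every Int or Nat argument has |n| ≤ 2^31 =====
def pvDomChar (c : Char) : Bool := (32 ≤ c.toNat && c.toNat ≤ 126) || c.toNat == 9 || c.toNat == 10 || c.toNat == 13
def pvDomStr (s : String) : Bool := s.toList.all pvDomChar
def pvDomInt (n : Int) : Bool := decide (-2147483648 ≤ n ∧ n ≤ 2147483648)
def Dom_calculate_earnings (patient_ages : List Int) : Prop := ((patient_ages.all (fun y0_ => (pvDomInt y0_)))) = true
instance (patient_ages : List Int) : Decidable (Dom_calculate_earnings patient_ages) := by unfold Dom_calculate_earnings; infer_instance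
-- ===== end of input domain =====

-- B replaces A's interleaved early-exit loop by a min/max range check plus a total aggregated over an
-- age histogram (fee per distinct age times multiplicity); objective: alternative.


-- ===== PORT A =====
-- the for-loop of A: threads total_income through, early-returns on an invalid age
def pvA_loop (ages : List Int) (total_income : Int) : String :=
  match ages with
  | [] => "Total Income: " ++ PySem.Int.toStr total_income ++ " INR"
  | age :: rest =>
    if age ≤ 0 ∨ age > 120 then "INVALID INPUT: Age must be between 1 and 120."
    else if age < 17 then pvA_loop rest (total_income + 200)
    else if age ≤ 40 then pvA_loop rest (total_income + 400)
    else pvA_loop rest (total_income + 300)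

def calculate_earnings (patient_ages : List Int) : String :=
  if (patient_ages.length : Int) > 20 then "INVALID INPUT: Maximum 20 patients allowed."
  else pvA_loop patient_ages 0

-- ===== PORT B =====
-- per-age fee, as in B's conditional expression
def pvB_fee (age : Int) : Int := if age < 17 then 200 else if age ≤ 40 then 400 else 300

-- 'patient_ages and (min(patient_ages) <= 0 or max(patient_ages) > 120)': min/max only reached on a nonempty list
def pvB_badRange (patient_ages : List Int) : Bool :=
  match PySem.List.min? patient_ages (fun x => x), PySem.List.max? patient_ages (fun x => x) with
  | some m, some M => decide (m ≤ 0) || decide (M > 120)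
  | _, _ => false    -- empty list: 'patient_ages and …' is falsy

-- B's histogram loop: counts[age] = counts.get(age, 0) + 1
def pvB_counts (patient_ages : List Int) : PySem.Dict Int Int :=
  patient_ages.foldl (fun d x => d.insert x (d.getD x 0 + 1)) PySem.Dict.empty

def calculate_earnings_alt (patient_ages : List Int) : String :=
  if (patient_ages.length : Int) > 20 then "INVALID INPUT: Maximum 20 patients allowed."
  else if pvB_badRange patient_ages then "INVALID INPUT: Age must be between 1 and 120."
  else
    let counts := pvB_counts patient_ages
    let total_income :=
      counts.items.foldl (fun t p => t + pvB_fee p.1 * p.2) 0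
    "Total Income: " ++ PySem.Int.toStr total_income ++ " INR"

-- ===== PRECONDITION & SPEC =====
def Spec_calculate_earnings (patient_ages : List Int) (out : String) : Prop := out = calculate_earnings_alt patient_ages
instance (patient_ages : List Int) (out : String) : Decidable (Spec_calculate_earnings patient_ages out) := by unfold Spec_calculate_earnings; infer_instance

-- ===== CLAIM (what is proved, stated in full; the proofs are below) =====
def Claim_equal_calculate_earnings : Prop := ∀ (patient_ages : List Int), Dom_calculate_earnings patient_ages → Spec_calculate_earnings patient_ages (calculate_earnings patient_ages)

-- ===== LEMMAS AND PROOFS =====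

-- A's early-exit loop, characterised: invalid iff some age is out of range, else the sum of fees.
theorem pvA_loop_eq (ages : List Int) (acc : Int) :
    pvA_loop ages acc =
      if ages.any (fun age => decide (age ≤ 0) || decide (age > 120)) then
        "INVALID INPUT: Age must be between 1 and 120."
      else "Total Income: " ++ PySem.Int.toStr (acc + (ages.map pvB_fee).sum) ++ " INR" := by
  induction ages generalizing acc with
  | nil => simp [pvA_loop]
  | cons a rest ih =>
    simp only [pvA_loop, List.any_cons, List.map_cons, List.sum_cons]
    by_cases h : a ≤ 0 ∨ a > 120
    · simp only [if_pos h, show (decide (a ≤ 0) || decide (a > 120)) = true by simp; omega,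
        Bool.true_or, if_true]
    · have hb : (decide (a ≤ 0) || decide (a > 120)) = false := by simp; omega
      simp only [hb, Bool.false_or]
      by_cases h17 : a < 17
      · simp only [if_neg h, if_pos h17, ih, pvB_fee]
        rw [show acc + (200 + (rest.map pvB_fee).sum) = acc + 200 + (rest.map pvB_fee).sum by ring]
      · by_cases h40 : a ≤ 40
        · simp only [if_neg h, if_pos h40, ih, pvB_fee, if_neg (by omega : ¬ a < 17)]
          rw [show acc + (400 + (rest.map pvB_fee).sum) = acc + 400 + (rest.map pvB_fee).sum by ring]
        · simp only [if_neg h, ih, pvB_fee,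
            if_neg (by omega : ¬ a < 17), if_neg (by omega : ¬ a ≤ 40)]
          rw [show acc + (300 + (rest.map pvB_fee).sum) = acc + 300 + (rest.map pvB_fee).sum by ring]

-- B's min/max test equals A's per-element scan.
theorem pvB_badRange_eq_any (xs : List Int) :
    pvB_badRange xs = xs.any (fun age => decide (age ≤ 0) || decide (age > 120)) := by
  unfold pvB_badRange
  cases hxs : xs with
  | nil => rfl
  | cons a t =>
    rw [← hxs]
    have hne : xs ≠ [] := by simp [hxs]
    obtain ⟨m, hm⟩ : ∃ m, PySem.List.min? xs (fun x => x) = some m := by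
      cases h : PySem.List.min? xs (fun x => x) with
      | none => exact absurd ((PySem.List.min?_eq_none_iff xs (fun x => x)).mp h) hne
      | some m => exact ⟨m, rfl⟩
    obtain ⟨M, hM⟩ : ∃ M, PySem.List.max? xs (fun x => x) = some M := by
      cases h : PySem.List.max? xs (fun x => x) with
      | none => exact absurd ((PySem.List.max?_eq_none_iff xs (fun x => x)).mp h) hne
      | some M => exact ⟨M, rfl⟩
    rw [hm, hM]
    by_cases hbad : xs.any (fun age => decide (age ≤ 0) || decide (age > 120)) = true
    · rw [hbad]
      rw [List.any_eq_true] at hbad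
      obtain ⟨a, ha, hpa⟩ := hbad
      have : a ≤ 0 ∨ a > 120 := by simpa using hpa
      rcases this with h0 | h120
      · have := PySem.List.min?_isMin hm a ha
        simp only [Bool.or_eq_true, decide_eq_true_eq]
        left; omega
      · have := PySem.List.max?_isMax hM a ha
        simp only [Bool.or_eq_true, decide_eq_true_eq]
        right; omega
    · rw [eq_false_of_ne_true hbad]
      rw [List.any_eq_true] at hbad
      push Not at hbad
      have hmA : ¬ (m ≤ 0) := by
        intro h0
        exact hbad m (PySem.List.min?_mem hm) (by simp; omega)
      have hMA : ¬ (M > 120) := by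
        intro h120
        exact hbad M (PySem.List.max?_mem hM) (by simp; omega)
      simp [hmA, hMA]

-- summing f a * indicator over a nodup list containing x picks out f x
theorem pv_sum_indicator (S : List Int) (f : Int → Int) (x : Int)
    (hnd : S.Nodup) (hx : x ∈ S) :
    (S.map (fun a => f a * (if x = a then (1 : Int) else 0))).sum = f x := by
  induction S with
  | nil => cases hx
  | cons s t ih =>
    simp only [List.map_cons, List.sum_cons]
    rcases List.mem_cons.mp hx with rfl | hxt
    · have hxnt : x ∉ t := (List.nodup_cons.mp hnd).1
      have hz : (t.map (fun a => f a * (if x = a then (1 : Int) else 0))).sum = 0 := by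
        apply List.sum_eq_zero
        intro y hy
        simp only [List.mem_map] at hy
        obtain ⟨a, hat, rfl⟩ := hy
        have hxa : x ≠ a := fun h => hxnt (h ▸ hat)
        rw [if_neg hxa, mul_zero]
      rw [hz, if_pos rfl, mul_one, add_zero]
    · have hsx : x ≠ s := fun h => (List.nodup_cons.mp hnd).1 (h ▸ hxt)
      rw [if_neg hsx, mul_zero, zero_add, ih (List.nodup_cons.mp hnd).2 hxt]

-- histogram sum: ∑_{a ∈ S} f a * count(a, xs) = ∑_{x ∈ xs} f x, for S ⊇ xs, S nodup
theorem pv_hist_sum (xs : List Int) (S : List Int) (f : Int → Int)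
    (hnd : S.Nodup) (hsub : ∀ x ∈ xs, x ∈ S) :
    (S.map (fun a => f a * (xs.count a : Int))).sum = (xs.map f).sum := by
  induction xs with
  | nil => simp
  | cons x t ih =>
    have hxS : x ∈ S := hsub x (List.mem_cons_self)
    have hsub' : ∀ y ∈ t, y ∈ S := fun y hy => hsub y (List.mem_cons_of_mem _ hy)
    have hsplit : ∀ a : Int, ((x :: t).count a : Int)
        = (t.count a : Int) + (if x = a then (1 : Int) else 0) := by
      intro a
      rcases eq_or_ne x a with rfl | h
      · simp
      · simp [h]
    calc (S.map (fun a => f a * ((x :: t).count a : Int))).sum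
        = (S.map (fun a => f a * (t.count a : Int)
            + f a * (if x = a then (1 : Int) else 0))).sum := by
          congr 1; apply List.map_congr_left; intro a _; rw [hsplit a]; ring
      _ = (S.map (fun a => f a * (t.count a : Int))).sum
            + (S.map (fun a => f a * (if x = a then (1 : Int) else 0))).sum := by
          rw [← List.sum_map_add]
      _ = (t.map f).sum + f x := by rw [ih hsub', pv_sum_indicator S f x hnd hxS]
      _ = ((x :: t).map f).sum := by simp only [List.map_cons, List.sum_cons]; ring

-- B's histogram total equals the plain sum of fees
theorem pvB_total_eq (xs : List Int) :
    (pvB_counts xs).items.foldl (fun t p => t + pvB_fee p.1 * p.2) 0 = (xs.map pvB_fee).sum := by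
  unfold pvB_counts
  rw [PySem.Dict.foldl_insert_getD_add_one_eq_counter, PySem.Dict.items_counter,
    PySem.List.foldl_add]
  have hnd : (PySem.Set.ofList xs : List Int).Nodup := PySem.Set.nodup_ofList xs
  have hsub : ∀ x ∈ xs, x ∈ (PySem.Set.ofList xs : List Int) := by
    intro x hx; exact (PySem.Set.mem_ofList xs x).mpr hx
  have := pv_hist_sum xs (PySem.Set.ofList xs) pvB_fee hnd hsub
  simp only [List.map_map]
  simpa using this

-- ===== VERDICT (by name: the statement is the Claim_ definition above) =====
theorem calculate_earnings_spec : Claim_equal_calculate_earnings := by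
  intro ages _
  unfold Spec_calculate_earnings calculate_earnings calculate_earnings_alt
  by_cases h : (ages.length : Int) > 20
  · simp [h]
  · simp only [h, if_false, pvA_loop_eq, pvB_badRange_eq_any, pvB_total_eq, zero_add]
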